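-- pv_equiv track=rewrite | github.com/bioinfcomav/goldebraid | goldenbraid/domestication.py | is_dna_palindrome
-- ===== SOURCE A (Python) =====
-- def is_dna_palindrome(seq):
--     nucl_palindromes = [('A', 'T'), ('T', 'A'), ('C', 'G'), ('G', 'C')]
--     seq_pals = []
--     if divmod(len(seq), 2)[1] != 0:
--         return False
--     for num in range(0, len(seq)):
--         rev_num = len(seq) - 1 - num
--         nucl_a = seq[num]
--         nucl_b = seq[rev_num]
--         if (nucl_a, nucl_b) in nucl_palindromes:
--             seq_pals.append(True)
--         else:
--             seq_pals.append(False)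
--     return all(seq_pals)
-- ===== SOURCE B (Python) =====
-- def is_dna_palindrome(seq):
--     comp = {'A': 'T', 'T': 'A', 'C': 'G', 'G': 'C'}
--     i, j = 0, len(seq) - 1
--     while i < j:
--         if comp.get(seq[i]) != seq[j]:
--             return False
--         i += 1
--         j -= 1
--     return i > j
-- ===== Notes on version B (the rewrite author's own statement) =====
-- stated objective: faster
-- what changed: Replaces A's full scan (parity precheck via divmod, n mirror comparisons collected into a bool list, final all()) with a converging two-pointer loop that early-exits on the first mismatch, performs at most n/2 comparisons, and derives the odd-length answer from the pointers meeting instead of a divmod check.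
import Mathlib
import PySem

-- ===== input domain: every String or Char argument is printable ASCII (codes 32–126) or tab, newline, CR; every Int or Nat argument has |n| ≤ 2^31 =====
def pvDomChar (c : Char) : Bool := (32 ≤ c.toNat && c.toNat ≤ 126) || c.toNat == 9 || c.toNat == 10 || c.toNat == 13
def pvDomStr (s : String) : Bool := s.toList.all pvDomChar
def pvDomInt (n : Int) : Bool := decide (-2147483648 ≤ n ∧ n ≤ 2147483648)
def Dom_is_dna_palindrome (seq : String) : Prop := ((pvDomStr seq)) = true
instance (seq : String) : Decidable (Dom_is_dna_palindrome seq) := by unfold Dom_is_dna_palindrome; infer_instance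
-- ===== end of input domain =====

-- B replaces A's full scan (parity precheck, n mirror comparisons collected into a list, final all())
-- by a converging two-pointer loop that exits on the first mismatch and does at most half the comparisons;
-- the odd-length answer falls out of the pointers meeting.

-- ===== PORT A =====
def is_dna_palindrome (seq : String) : Bool :=
  let nucl_palindromes : List (Char × Char) := [('A','T'), ('T','A'), ('C','G'), ('G','C')]
  let n : Int := PySem.Str.len seq
  match PySem.Int.divmod? n 2 with
  | none => false
  | some qr =>
    if qr.2 ≠ 0 then false
    else
      let seq_pals : List Bool := (PySem.List.pyRange 0 n 1).foldl (fun acc num =>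
        let rev_num : Int := n - 1 - num
        match PySem.Str.pyGet? seq num, PySem.Str.pyGet? seq rev_num with
        | some nucl_a, some nucl_b =>
            if (nucl_a, nucl_b) ∈ nucl_palindromes then acc ++ [true] else acc ++ [false]
        | _, _ => acc ++ [false]) []
      seq_pals.all id

-- ===== PORT B =====
-- the `while i < j` loop of Source B; terminates because j - i shrinks by 2 each round
def altLoop (l : List Char) (i j : Int) : Bool :=
  if _h : i < j then
    (match PySem.List.pyGet? l i with
    | none => false
    | some a =>
      match PySem.List.pyGet? l j with
      | none => false
      | some b =>
          if (PySem.Dict.ofList [('A','T'), ('T','A'), ('C','G'), ('G','C')]).get? a ≠ some b then false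
          else altLoop l (i + 1) (j - 1))
  else decide (j < i)
termination_by (j - i).toNat
decreasing_by omega

def is_dna_palindrome_alt (seq : String) : Bool :=
  altLoop seq.toList 0 (PySem.Str.len seq - 1)

-- ===== PRECONDITION & SPEC =====
def Spec_is_dna_palindrome (seq : String) (out : Bool) : Prop := out = is_dna_palindrome_alt seq
instance (seq : String) (out : Bool) : Decidable (Spec_is_dna_palindrome seq out) := by unfold Spec_is_dna_palindrome; infer_instance

-- ===== CLAIM (what is proved, stated in full; the proofs are below) =====
def Claim_equal_is_dna_palindrome : Prop := ∀ (seq : String), Dom_is_dna_palindrome seq → Spec_is_dna_palindrome seq (is_dna_palindrome seq)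

-- ===== LEMMAS AND PROOFS =====

-- the complement lookup A's pair list and B's dict both encode, as a plain function
def compFun (a : Char) : Option Char :=
  if a = 'A' then some 'T' else if a = 'T' then some 'A'
  else if a = 'C' then some 'G' else if a = 'G' then some 'C' else none

lemma compGet_eq (a : Char) :
    (PySem.Dict.ofList [('A','T'), ('T','A'), ('C','G'), ('G','C')]).get? a = compFun a := by
  have h : (PySem.Dict.ofList [('A','T'), ('T','A'), ('C','G'), ('G','C')] : PySem.Dict Char Char)
      = PySem.Dict.mk [('A','T'), ('T','A'), ('C','G'), ('G','C')] := by decide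
  rw [h]
  by_cases h1 : a = 'A'
  · subst h1; decide
  by_cases h2 : a = 'T'
  · subst h2; decide
  by_cases h3 : a = 'C'
  · subst h3; decide
  by_cases h4 : a = 'G'
  · subst h4; decide
  unfold compFun
  simp only [PySem.Dict.get?_mk_cons, beq_iff_eq]
  rw [if_neg (fun hh => h1 hh.symm), if_neg (fun hh => h2 hh.symm),
      if_neg (fun hh => h3 hh.symm), if_neg (fun hh => h4 hh.symm),
      if_neg h1, if_neg h2, if_neg h3, if_neg h4]
  rfl

lemma pair_mem_iff (a b : Char) :
    ((a, b) ∈ ([('A','T'), ('T','A'), ('C','G'), ('G','C')] : List (Char × Char))) ↔ compFun a = some b := by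
  by_cases h1 : a = 'A'
  · subst h1; simp [compFun, Prod.ext_iff, eq_comm]
  by_cases h2 : a = 'T'
  · subst h2; simp [compFun, Prod.ext_iff, eq_comm]
  by_cases h3 : a = 'C'
  · subst h3; simp [compFun, h1, Prod.ext_iff, eq_comm]
  by_cases h4 : a = 'G'
  · subst h4; simp [compFun, h1, h2, Prod.ext_iff, eq_comm]
  simp [compFun, h1, h2, h3, h4, Prod.ext_iff]

lemma compFun_symm {a b : Char} (h : compFun a = some b) : compFun b = some a := by
  unfold compFun at h ⊢
  split_ifs at h with h1 h2 h3 h4 <;> simp_all <;> subst h <;> decide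

-- the per-position condition A checks
def pairProp (l : List Char) : Prop :=
  ∀ j, j < l.length → compFun (l.getD j ' ') = some (l.getD (l.length - 1 - j) ' ')

-- A's loop-body condition at an in-range index, expressed through compFun
lemma g_eq (l : List Char) (num : Int) (h0 : 0 ≤ num) (hn : num < ↑l.length) :
    ((match PySem.List.pyGet? l num, PySem.List.pyGet? l (↑l.length - 1 - num) with
      | some a, some b => decide ((a, b) ∈ ([('A','T'), ('T','A'), ('C','G'), ('G','C')] : List (Char × Char)))
      | _, _ => false) = true)
    ↔ compFun (l.getD num.toNat ' ') = some (l.getD (l.length - 1 - num.toNat) ' ') := by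
  obtain ⟨j, rfl⟩ : ∃ j : Nat, num = ↑j := ⟨num.toNat, (Int.toNat_of_nonneg h0).symm⟩
  have hj : j < l.length := by exact_mod_cast hn
  have e2 : (↑l.length - 1 - ↑j : Int) = ↑(l.length - 1 - j) := by omega
  rw [e2, PySem.List.pyGet?_natCast, PySem.List.pyGet?_natCast,
      List.getElem?_eq_getElem hj, List.getElem?_eq_getElem (show l.length - 1 - j < l.length by omega)]
  simp only [decide_eq_true_eq, pair_mem_iff, Int.toNat_natCast,
      List.getD_eq_getElem l ' ' hj, List.getD_eq_getElem l ' ' (show l.length - 1 - j < l.length by omega)]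

lemma a_iff (seq : String) :
    is_dna_palindrome seq = true ↔ seq.toList.length % 2 = 0 ∧ pairProp seq.toList := by
  unfold is_dna_palindrome
  simp only [pysem]
  generalize seq.toList = l
  rw [show PySem.Int.divmod? (↑l.length) 2 = some (PySem.Int.floordiv ↑l.length 2, PySem.Int.mod ↑l.length 2) from by
    simp [PySem.Int.divmod?, PySem.Int.floordiv, PySem.Int.mod]]
  rw [show (PySem.Int.mod (↑l.length) 2 : Int) = ↑(l.length % 2) from PySem.Int.mod_natCast _ _]
  by_cases hp : l.length % 2 = 0
  · rw [hp]
    simp only [Nat.cast_zero, ne_eq, not_true_eq_false, if_false, true_and]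
    rw [show (fun (acc : List Bool) (num : Int) =>
        match PySem.List.pyGet? l num, PySem.List.pyGet? l (↑l.length - 1 - num) with
        | some nucl_a, some nucl_b =>
            if (nucl_a, nucl_b) ∈ [('A','T'), ('T','A'), ('C','G'), ('G','C')] then acc ++ [true] else acc ++ [false]
        | _, _ => acc ++ [false]) =
      (fun acc num => acc ++ [(fun num =>
        match PySem.List.pyGet? l num, PySem.List.pyGet? l (↑l.length - 1 - num) with
        | some a, some b =>
            decide ((a, b) ∈ ([('A','T'), ('T','A'), ('C','G'), ('G','C')] : List (Char × Char)))
        | _, _ => false) num]) from by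
      funext acc num
      rcases h1 : PySem.List.pyGet? l num with _ | a <;>
        rcases h2 : PySem.List.pyGet? l (↑l.length - 1 - num) with _ | b <;> simp only [h1, h2]
      split_ifs with hm <;> simp [hm]]
    rw [PySem.List.foldl_append_singleton_eq_map]
    simp only [List.nil_append, List.all_map, List.all_eq_true, Function.comp, id_eq,
      PySem.List.mem_pyRange_one]
    unfold pairProp
    constructor
    · intro h j hj
      have := (g_eq l ↑j (by omega) (by exact_mod_cast hj)).mp (h ↑j ⟨by omega, by exact_mod_cast hj⟩)
      simpa using this
    · intro h num hmem
      exact (g_eq l num hmem.1 hmem.2).mpr (h num.toNat (by omega))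
  · have hne : ((l.length % 2 : Nat) : Int) ≠ 0 := by exact_mod_cast hp
    simp only [ne_eq, hne, not_false_eq_true, if_true]
    simp [hp]

-- invariant of Source B's while loop: pointers mirror each other (i + j = n - 1)
lemma loop_iff (l : List Char) : ∀ (d : Nat) (i j : Int),
    j + 1 - i = (d : Int) → 0 ≤ i → i + j = (l.length : Int) - 1 →
    (altLoop l i j = true ↔
      d % 2 = 0 ∧ ∀ k : Int, i ≤ k → k ≤ j →
        compFun (l.getD k.toNat ' ') = some (l.getD ((l.length : Int) - 1 - k).toNat ' ')) := by
  intro d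
  induction d using Nat.strong_induction_on with
  | _ d ih =>
    intro i j hd h0 hsum
    by_cases hij : i < j
    · have hd2 : 2 ≤ d := by omega
      have hi : i < (l.length : Int) := by omega
      have hj0 : 0 ≤ j := by omega
      have hjn : j < (l.length : Int) := by omega
      obtain ⟨a, ha⟩ : ∃ a, PySem.List.pyGet? l i = some a := by
        obtain ⟨i', rfl⟩ : ∃ i' : Nat, i = ↑i' := ⟨i.toNat, (Int.toNat_of_nonneg h0).symm⟩
        rw [PySem.List.pyGet?_natCast]
        exact ⟨_, List.getElem?_eq_getElem (by exact_mod_cast hi)⟩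
      obtain ⟨b, hb⟩ : ∃ b, PySem.List.pyGet? l j = some b := by
        obtain ⟨j', rfl⟩ : ∃ j' : Nat, j = ↑j' := ⟨j.toNat, (Int.toNat_of_nonneg hj0).symm⟩
        rw [PySem.List.pyGet?_natCast]
        exact ⟨_, List.getElem?_eq_getElem (by exact_mod_cast hjn)⟩
      have ha' : l.getD i.toNat ' ' = a := by
        rw [List.getD_eq_getElem?_getD]
        rw [show PySem.List.pyGet? l i = l[i.toNat]? from by
          conv_lhs => rw [show i = (i.toNat : Int) by omega]
          exact PySem.List.pyGet?_natCast _ _] at ha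
        simp [ha]
      have hb' : l.getD j.toNat ' ' = b := by
        rw [List.getD_eq_getElem?_getD]
        rw [show PySem.List.pyGet? l j = l[j.toNat]? from by
          conv_lhs => rw [show j = (j.toNat : Int) by omega]
          exact PySem.List.pyGet?_natCast _ _] at hb
        simp [hb]
      rw [altLoop, dif_pos hij, ha, hb]
      rw [show (match (some b : Option Char) with
        | none => false
        | some b =>
            if (PySem.Dict.ofList [('A','T'), ('T','A'), ('C','G'), ('G','C')]).get? a ≠ some b then false
            else altLoop l (i + 1) (j - 1))
          = (if (PySem.Dict.ofList [('A','T'), ('T','A'), ('C','G'), ('G','C')]).get? a ≠ some b then false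
             else altLoop l (i + 1) (j - 1)) from rfl, compGet_eq]
      by_cases hc : compFun a = some b
      · rw [if_neg (by simp [hc])]
        rw [ih (d - 2) (by omega) (i + 1) (j - 1) (by omega) (by omega) (by omega)]
        constructor
        · rintro ⟨hpar, hall⟩
          refine ⟨by omega, fun k hk1 hk2 => ?_⟩
          by_cases hki : k = i
          · subst hki
            rw [ha', show ((l.length : Int) - 1 - k).toNat = j.toNat by omega, hb']
            exact hc
          by_cases hkj : k = j
          · subst hkj
            rw [hb', show ((l.length : Int) - 1 - k).toNat = i.toNat by omega, ha']
            exact compFun_symm hc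
          exact hall k (by omega) (by omega)
        · rintro ⟨hpar, hall⟩
          exact ⟨by omega, fun k hk1 hk2 => hall k (by omega) (by omega)⟩
      · rw [if_pos (by simp [hc])]
        constructor
        · intro h; exact Bool.noConfusion h
        · rintro ⟨-, hall⟩
          exact absurd (by have := hall i le_rfl (le_of_lt hij)
                           rwa [ha', show ((l.length : Int) - 1 - i).toNat = j.toNat by omega, hb'] at this) hc
    · rw [altLoop, dif_neg hij]
      by_cases heq : i = j
      · have hd1 : d = 1 := by omega
        subst heq
        subst hd1
        simp
      · have hd0 : d = 0 := by omega
        have : j < i := by omega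
        simp only [this, decide_true, true_iff, hd0, Nat.zero_mod, true_and]
        intro k hk1 hk2; omega

lemma alt_iff (seq : String) :
    is_dna_palindrome_alt seq = true ↔ seq.toList.length % 2 = 0 ∧ pairProp seq.toList := by
  unfold is_dna_palindrome_alt
  simp only [pysem]
  generalize seq.toList = l
  rw [loop_iff l l.length 0 ((l.length : Int) - 1) (by omega) le_rfl (by omega)]
  unfold pairProp
  constructor
  · rintro ⟨hpar, hall⟩
    refine ⟨hpar, fun j hj => ?_⟩
    have := hall ↑j (by omega) (by omega)
    rw [Int.toNat_natCast, show ((l.length : Int) - 1 - ↑j).toNat = l.length - 1 - j by omega] at this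
    exact this
  · rintro ⟨hpar, hall⟩
    refine ⟨hpar, fun k hk1 hk2 => ?_⟩
    have := hall k.toNat (by omega)
    rwa [show ((l.length : Int) - 1 - k).toNat = l.length - 1 - k.toNat by omega]

-- ===== VERDICT (by name: the statement is the Claim_ definition above) =====
theorem is_dna_palindrome_spec : Claim_equal_is_dna_palindrome := by
  intro seq _
  unfold Spec_is_dna_palindrome
  rw [Bool.eq_iff_iff, a_iff, alt_iff]
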